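-- pv_equiv track=rewrite | github.com/smolvik1/adventofcode | 2022/Day 3/day3.py | valueError
-- ===== SOURCE A (Python) =====
-- def value(letter):
--     if letter.isupper():
--         value = ord(letter) - 38
--     elif letter.islower():
--         value = ord(letter) - 96
--     return value
--
-- def valueError(comp1, comp2):
--     itemError = []
--     itemErrorValue = 0
--
--     for item in comp1:
--         if (item in comp2) and (item not in itemError):
--             itemError.append(item)
--             itemErrorValue += value(item)
--     return itemErrorValue
-- ===== SOURCE B (Python) =====
-- def value(letter):
--     if letter.isupper():
--         value = ord(letter) - 38
--     elif letter.islower():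
--         value = ord(letter) - 96
--     return value
--
-- def valueError(comp1, comp2):
--     common = set(comp1) & set(comp2)
--     return sum(value(c) for c in common)
-- ===== Notes on version B (the rewrite author's own statement) =====
-- stated objective: faster
-- what changed: Replaces A's scan over comp1 with per-item substring membership tests and a growing seen-list dedup by building the set intersection of the two strings once and summing value() over its distinct elements.
import Mathlib
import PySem

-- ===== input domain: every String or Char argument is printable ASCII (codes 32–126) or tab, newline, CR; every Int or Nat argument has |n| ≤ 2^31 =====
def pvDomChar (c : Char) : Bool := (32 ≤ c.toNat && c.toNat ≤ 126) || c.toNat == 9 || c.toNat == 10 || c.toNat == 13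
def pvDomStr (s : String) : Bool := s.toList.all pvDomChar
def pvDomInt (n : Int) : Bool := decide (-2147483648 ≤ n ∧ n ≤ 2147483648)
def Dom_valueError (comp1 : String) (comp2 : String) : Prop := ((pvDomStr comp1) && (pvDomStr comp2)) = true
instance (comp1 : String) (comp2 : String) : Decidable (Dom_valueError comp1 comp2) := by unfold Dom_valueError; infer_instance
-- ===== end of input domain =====

-- B replaces A's per-item membership/seen-list loop by one set intersection and a sum over it (idiomatic).

-- ===== PORT A =====
-- helper `value` shared verbatim by both Pythons; the fall-through where `letter`
-- is neither upper nor lower is an UnboundLocalError in Python — excluded by Pre_.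
def value_ (letter : Char) : Int :=
  if PySem.Chars.isupper letter then (letter.toNat : Int) - 38
  else if PySem.Chars.islower letter then (letter.toNat : Int) - 96
  else 0

-- `item in comp2` is Python's substring test; for the single character `item` it is
-- exactly character membership in comp2's characters (exact).
def valueError (comp1 : String) (comp2 : String) : Int :=
  (comp1.toList.foldl
    (fun (st : List Char × Int) item =>
      if item ∈ comp2.toList ∧ item ∉ st.1
      then (st.1 ++ [item], st.2 + value_ item)
      else st)
    ([], 0)).2

-- ===== PORT B =====
-- common = set(comp1) & set(comp2); sum of value over its elements (an Int sum is order-independent).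
def valueError_alt (comp1 : String) (comp2 : String) : Int :=
  let common : PySem.Set Char :=
    PySem.Set.inter (PySem.Set.ofList comp1.toList) (PySem.Set.ofList comp2.toList)
  (common.map value_).sum

-- ===== PRECONDITION & SPEC =====
-- Pre_ excludes exactly the inputs on which Python A raises (UnboundLocalError in
-- `value` for a shared item that is neither an uppercase nor a lowercase letter).
def Pre_valueError (comp1 : String) (comp2 : String) : Prop :=
  (comp1.toList.all (fun c =>
    !(comp2.toList.contains c) || (PySem.Chars.isupper c || PySem.Chars.islower c))) = true
instance (comp1 : String) (comp2 : String) : Decidable (Pre_valueError comp1 comp2) := by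
  unfold Pre_valueError; infer_instance
def pvWitness_valueError : String × String := ("abcd", "cdef")

def Spec_valueError (comp1 : String) (comp2 : String) (out : Int) : Prop := out = valueError_alt comp1 comp2
instance (comp1 : String) (comp2 : String) (out : Int) : Decidable (Spec_valueError comp1 comp2 out) := by unfold Spec_valueError; infer_instance

-- ===== CLAIM (what is proved, stated in full; the proofs are below) =====
def Claim_equal_valueError : Prop := ∀ (comp1 : String) (comp2 : String), Dom_valueError comp1 comp2 → Pre_valueError comp1 comp2 → Spec_valueError comp1 comp2 (valueError comp1 comp2)

-- ===== LEMMAS AND PROOFS =====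

-- A's loop, from any state: result = acc + sum of value_ over the distinct chars of
-- the remaining list that lie in comp2 and are not yet in the seen-list.
theorem valueError_loop (c2l : List Char) (l : List Char) :
    ∀ (seen : List Char) (acc : Int),
      (l.foldl
        (fun (st : List Char × Int) item =>
          if item ∈ c2l ∧ item ∉ st.1
          then (st.1 ++ [item], st.2 + value_ item)
          else st)
        (seen, acc)).2
      = acc + ∑ x ∈ (l.toFinset ∩ c2l.toFinset) \ seen.toFinset, value_ x := by
  induction l with
  | nil => intro seen acc; simp
  | cons a l ih =>
    intro seen acc
    by_cases h2 : a ∈ c2l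
    · by_cases hs : a ∈ seen
      · have hcond : ¬ (a ∈ c2l ∧ a ∉ seen) := by tauto
        simp only [List.foldl_cons, if_neg hcond, ih]
        congr 1
        congr 1
        ext x
        by_cases hxa : x = a
        · subst hxa; simp [hs]
        · simp [hxa]
      · have hcond : a ∈ c2l ∧ a ∉ seen := ⟨h2, hs⟩
        simp only [List.foldl_cons, if_pos hcond, ih]
        have hseen : (seen ++ [a]).toFinset = insert a seen.toFinset := by
          ext x; simp
        rw [hseen]
        have hset : ((a :: l).toFinset ∩ c2l.toFinset) \ seen.toFinset
            = insert a (((l.toFinset ∩ c2l.toFinset) \ insert a seen.toFinset).erase a) := by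
          ext x
          by_cases hxa : x = a
          · subst hxa; simp [h2, hs]
          · simp only [Finset.mem_insert, Finset.mem_erase, Finset.mem_sdiff,
              Finset.mem_inter, List.mem_toFinset, List.toFinset_cons, Finset.mem_insert]
            tauto
        rw [hset, Finset.sum_insert (Finset.notMem_erase _ _)]
        have herase : ((l.toFinset ∩ c2l.toFinset) \ insert a seen.toFinset).erase a
            = (l.toFinset ∩ c2l.toFinset) \ insert a seen.toFinset := by
          apply Finset.erase_eq_of_notMem
          simp
        rw [herase]
        ring
    · have hcond : ¬ (a ∈ c2l ∧ a ∉ seen) := by tauto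
      simp only [List.foldl_cons, if_neg hcond, ih]
      congr 1
      congr 1
      ext x
      by_cases hxa : x = a
      · subst hxa; simp [h2]
      · simp [hxa]

-- B's intersection set sums value_ over the same Finset.
theorem valueError_alt_sum (c1 c2 : String) :
    valueError_alt c1 c2
      = ∑ x ∈ c1.toList.toFinset ∩ c2.toList.toFinset, value_ x := by
  unfold valueError_alt
  set common : PySem.Set Char :=
    PySem.Set.inter (PySem.Set.ofList c1.toList) (PySem.Set.ofList c2.toList) with hc
  have hnd : common.Nodup := by
    rw [hc]; exact PySem.Set.nodup_inter _ _ (PySem.Set.nodup_ofList _)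
  have hfs : common.toFinset = c1.toList.toFinset ∩ c2.toList.toFinset := by
    ext x
    simp [hc, Finset.mem_inter, List.mem_toFinset, PySem.Set.mem_inter, PySem.Set.mem_ofList]
  rw [← hfs, List.sum_toFinset _ hnd]

theorem valueError_eq (c1 c2 : String) : valueError c1 c2 = valueError_alt c1 c2 := by
  rw [valueError_alt_sum]
  unfold valueError
  rw [valueError_loop]
  simp

-- ===== VERDICT (by name: the statement is the Claim_ definition above) =====
theorem valueError_spec : Claim_equal_valueError := by
  intro c1 c2 _ _
  unfold Spec_valueError
  exact valueError_eq c1 c2
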